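-- pv_equiv track=rewrite | github.com/HerodotusDev/hdp-cairo | tools/py/mmr.py | is_valid_mmr_size
-- ===== SOURCE A (Python) =====
-- def is_valid_mmr_size(n):
--     prev_peak = 0
--     while n > 0:
--         i = n.bit_length()
--         peak = 2**i - 1
--         if peak > n:
--             i -= 1
--             peak = 2**i - 1
--         if peak == prev_peak:
--             return False
--         prev_peak = peak
--         n -= peak
--     return n == 0
-- ===== SOURCE B (Python) =====
-- def is_valid_mmr_size(n):
--     # n is a valid MMR size iff n = 2*L - popcount(L) for some leaf count L >= 0.
--     if n < 0:
--         return False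
--     for p in range(n.bit_length() + 3):
--         if (n + p) % 2 == 0:
--             L = (n + p) // 2
--             if bin(L).count("1") == p:
--                 return True
--     return False
-- ===== Notes on version B (the rewrite author's own statement) =====
-- stated objective: alternative
-- what changed: A greedily subtracts the largest perfect-peak 2^i-1 from n in a loop until it repeats a peak or reaches 0; B instead searches the O(log n) candidate popcount values p and accepts iff n = 2*L - p for some L with popcount(L) = p, using the identity that n is a valid MMR size iff n = 2*L - popcount(L) for some leaf count L.
import Mathlib
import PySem

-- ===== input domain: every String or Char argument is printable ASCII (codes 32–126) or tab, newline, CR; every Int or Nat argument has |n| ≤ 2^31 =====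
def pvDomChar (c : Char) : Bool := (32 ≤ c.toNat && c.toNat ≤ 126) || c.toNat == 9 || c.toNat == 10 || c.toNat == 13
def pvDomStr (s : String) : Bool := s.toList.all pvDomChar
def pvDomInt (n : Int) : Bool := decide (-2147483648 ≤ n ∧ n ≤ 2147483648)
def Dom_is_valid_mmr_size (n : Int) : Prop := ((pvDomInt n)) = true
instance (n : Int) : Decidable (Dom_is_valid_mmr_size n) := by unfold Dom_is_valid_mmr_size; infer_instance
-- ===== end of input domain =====

-- B replaces A's greedy peak-subtraction loop by a short search over candidate popcounts p,
-- using the identity "n is a valid MMR size iff n = 2*L - popcount(L) for some leaf count L" (objective: alternative).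

-- ===== PORT A =====
-- n.bit_length() for n > 0 is Nat.size n.toNat (exact: A only calls it when n > 0);
-- the Python locals i/peak are written inline so that each branch carries its own peak.
def loopA (n prev_peak : Int) : Bool :=
  if h : 0 < n then
    if hgt : (2:Int) ^ Nat.size n.toNat - 1 > n then
      if (2:Int) ^ (Nat.size n.toNat - 1) - 1 = prev_peak then false
      else loopA (n - ((2:Int) ^ (Nat.size n.toNat - 1) - 1)) ((2:Int) ^ (Nat.size n.toNat - 1) - 1)
    else
      if (2:Int) ^ Nat.size n.toNat - 1 = prev_peak then false
      else loopA (n - ((2:Int) ^ Nat.size n.toNat - 1)) ((2:Int) ^ Nat.size n.toNat - 1)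
  else decide (n = 0)
termination_by n.toNat
decreasing_by
  · -- adjusted branch: 2^(size-1) ≤ n and peak2 = 2^(size-1)-1 with size ≥ 2, so 0 < n - peak2 < n
    have hs1 : 0 < Nat.size n.toNat := Nat.size_pos.mpr (by omega)
    have hsz : 2 ^ (Nat.size n.toNat - 1) ≤ n.toNat := Nat.lt_size.mp (by omega)
    have hIs : (2:Int) ^ (Nat.size n.toNat - 1) ≤ n := by
      calc (2:Int) ^ (Nat.size n.toNat - 1) = ((2 ^ (Nat.size n.toNat - 1) : Nat) : Int) := by
            push_cast
            ring
        _ ≤ (n.toNat : Int) := Nat.cast_le.mpr hsz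
        _ = n := Int.toNat_of_nonneg (by omega)
    have hpow : (2:Int) ^ Nat.size n.toNat = 2 * 2 ^ (Nat.size n.toNat - 1) := by
      rw [← pow_succ']
      congr 1
      omega
    omega
  · -- unadjusted branch: 1 ≤ peak ≤ n
    have hs1 : 0 < Nat.size n.toNat := Nat.size_pos.mpr (by omega)
    have h2 : (2:Int) ≤ 2 ^ Nat.size n.toNat := by
      calc (2:Int) = 2 ^ 1 := (pow_one 2).symm
        _ ≤ 2 ^ Nat.size n.toNat := pow_le_pow_right₀ (by norm_num) hs1
    omega

def is_valid_mmr_size (n : Int) : Bool := loopA n 0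

-- ===== PORT B =====
-- bin(L).count('1') for L ≥ 0 is this binary popcount (exact: B only applies it to L = (n+p)//2 with n, p ≥ 0)
def pc (n : Nat) : Nat :=
  if h : n = 0 then 0 else pc (n / 2) + n % 2
decreasing_by exact Nat.div_lt_self (Nat.pos_of_ne_zero h) one_lt_two

def is_valid_mmr_size_alt (n : Int) : Bool :=
  if n < 0 then false
  else
    -- n.bit_length() for n ≥ 0 is Nat.size n.toNat (exact)
    (PySem.List.pyRange 0 ((Nat.size n.toNat : Int) + 3) 1).any fun p =>
      if PySem.Int.mod (n + p) 2 == 0 then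
        ((pc ((PySem.Int.floordiv (n + p) 2).toNat) : Int) == p)
      else false

-- ===== PRECONDITION & SPEC =====
def Spec_is_valid_mmr_size (n : Int) (out : Bool) : Prop := out = is_valid_mmr_size_alt n
instance (n : Int) (out : Bool) : Decidable (Spec_is_valid_mmr_size n out) := by unfold Spec_is_valid_mmr_size; infer_instance

-- ===== CLAIM (what is proved, stated in full; the proofs are below) =====
def Claim_equal_is_valid_mmr_size : Prop := ∀ (n : Int), Dom_is_valid_mmr_size n → Spec_is_valid_mmr_size n (is_valid_mmr_size n)

-- ===== LEMMAS AND PROOFS =====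

-- f L = the MMR size for L leaves
def f (L : Nat) : Nat := 2 * L - pc L

theorem pc_zero : pc 0 = 0 := by rw [pc]; rfl

theorem pc_two_mul (m : Nat) : pc (2 * m) = pc m := by
  rcases Nat.eq_zero_or_pos m with h | h
  · simp [h]
  · rw [pc]
    have h1 : ¬ (2 * m = 0) := by omega
    have h2 : 2 * m / 2 = m := by omega
    have h3 : 2 * m % 2 = 0 := by omega
    simp [h1, h2, h3]

theorem pc_two_mul_add_one (m : Nat) : pc (2 * m + 1) = pc m + 1 := by
  rw [pc]
  have h2 : (2 * m + 1) / 2 = m := by omega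
  have h3 : (2 * m + 1) % 2 = 1 := by omega
  simp [h2, h3]

theorem pc_le_self (n : Nat) : pc n ≤ n := by
  induction n using Nat.strong_induction_on with
  | _ n ih =>
    rcases Nat.eq_zero_or_pos n with h | h
    · simp [h, pc_zero]
    · rw [pc]
      have hd : n / 2 < n := Nat.div_lt_self h one_lt_two
      have := ih (n / 2) hd
      have h1 : ¬ (n = 0) := by omega
      simp only [h1, dif_neg, not_false_iff]
      omega

theorem pc_pos (n : Nat) (h : 0 < n) : 0 < pc n := by
  induction n using Nat.strong_induction_on with
  | _ n ih =>
    rw [pc]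
    have h1 : ¬ (n = 0) := by omega
    simp only [h1, dif_neg, not_false_iff]
    rcases Nat.mod_two_eq_zero_or_one n with h2 | h2
    · have h3 : 0 < n / 2 := by omega
      have := ih (n / 2) (Nat.div_lt_self h one_lt_two) h3
      omega
    · omega

theorem pc_succ_le (n : Nat) : pc (n + 1) ≤ pc n + 1 := by
  induction n using Nat.strong_induction_on with
  | _ n ih =>
    rcases Nat.mod_two_eq_zero_or_one n with h2 | h2
    · have e1 : pc n = pc (n / 2) := by
        nth_rewrite 1 [show n = 2 * (n / 2) by omega]
        exact pc_two_mul _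
      have e2 : pc (n + 1) = pc (n / 2) + 1 := by
        rw [show n + 1 = 2 * (n / 2) + 1 by omega]
        exact pc_two_mul_add_one _
      omega
    · have hlt : n / 2 < n := by omega
      have e1 : pc n = pc (n / 2) + 1 := by
        nth_rewrite 1 [show n = 2 * (n / 2) + 1 by omega]
        exact pc_two_mul_add_one _
      have e2 : pc (n + 1) = pc (n / 2 + 1) := by
        rw [show n + 1 = 2 * (n / 2 + 1) by omega]
        exact pc_two_mul _
      have := ih (n / 2) hlt
      omega

theorem f_strictMono : StrictMono f := by
  apply strictMono_nat_of_lt_succ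
  intro n
  have h1 := pc_succ_le n
  have h2 := pc_le_self n
  have h3 := pc_le_self (n + 1)
  have h4 := pc_pos (n + 1) (by omega)
  unfold f
  omega

theorem f_le_self (L : Nat) : L ≤ f L := by
  have := pc_le_self L
  unfold f; omega

theorem f_ub (L : Nat) (h : 0 < L) : f L ≤ 2 * L - 1 := by
  have := pc_pos L h
  unfold f; omega

theorem pc_pow_add (j M : Nat) (h : M < 2 ^ j) : pc (2 ^ j + M) = pc M + 1 := by
  induction j generalizing M with
  | zero =>
    have hM : M = 0 := by omega
    subst hM
    rw [show (2:Nat) ^ 0 + 0 = 2 * 0 + 1 by norm_num, pc_two_mul_add_one, pc_zero]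
  | succ j ih =>
    have hpow : 2 ^ (j + 1) = 2 * 2 ^ j := by ring
    have hM2 : M / 2 < 2 ^ j := by omega
    have hih := ih _ hM2
    rcases Nat.mod_two_eq_zero_or_one M with h2 | h2
    · have e1 : pc (2 ^ (j + 1) + M) = pc (2 ^ j + M / 2) := by
        rw [show 2 ^ (j + 1) + M = 2 * (2 ^ j + M / 2) by omega]
        exact pc_two_mul _
      have e2 : pc M = pc (M / 2) := by
        nth_rewrite 1 [show M = 2 * (M / 2) by omega]
        exact pc_two_mul _
      omega
    · have e1 : pc (2 ^ (j + 1) + M) = pc (2 ^ j + M / 2) + 1 := by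
        rw [show 2 ^ (j + 1) + M = 2 * (2 ^ j + M / 2) + 1 by omega]
        exact pc_two_mul_add_one _
      have e2 : pc M = pc (M / 2) + 1 := by
        nth_rewrite 1 [show M = 2 * (M / 2) + 1 by omega]
        exact pc_two_mul_add_one _
      omega

theorem f_pow_add (j M : Nat) (h : M < 2 ^ j) : f (2 ^ j + M) = f M + (2 ^ (j + 1) - 1) := by
  unfold f
  rw [pc_pow_add j M h]
  have h1 := pc_le_self M
  have h2 : 2 ^ (j + 1) = 2 * 2 ^ j := by ring
  omega

theorem f_pow (j : Nat) : f (2 ^ j) = 2 ^ (j + 1) - 1 := by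
  have := f_pow_add j 0 (pow_pos (by norm_num) j)
  simpa [f, pc_zero] using this

theorem pc_le_size (n : Nat) : pc n ≤ Nat.size n := by
  induction n using Nat.strong_induction_on with
  | _ n ih =>
    rcases Nat.eq_zero_or_pos n with h | h
    · simp [h, pc_zero]
    · rw [pc]
      have h1 : ¬ (n = 0) := by omega
      simp only [h1, dif_neg, not_false_iff]
      have hlt : n / 2 < n := Nat.div_lt_self h one_lt_two
      have hih := ih (n / 2) hlt
      have hstep : 2 ^ Nat.size (n / 2) ≤ n := by
        rcases Nat.eq_zero_or_pos (n / 2) with h2 | h2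
        · simp [h2, Nat.size_zero]
          omega
        · have hs : 0 < Nat.size (n / 2) := Nat.size_pos.mpr h2
          have hd : 2 ^ (Nat.size (n / 2) - 1) ≤ n / 2 := Nat.lt_size.mp (by omega)
          have hp : 2 ^ Nat.size (n / 2) = 2 * 2 ^ (Nat.size (n / 2) - 1) := by
            rw [← pow_succ']
            congr 1
            omega
          omega
      have := Nat.lt_size.mpr hstep
      omega

-- one unfolding of A's loop for a positive argument
theorem loopA_unfold (m : Nat) (prev : Int) (hm : 1 ≤ m) :
    loopA (m : Int) prev =
      (if (2:Int) ^ Nat.size m - 1 > (m : Int) then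
        (if (2:Int) ^ (Nat.size m - 1) - 1 = prev then false
         else loopA ((m : Int) - ((2:Int) ^ (Nat.size m - 1) - 1)) ((2:Int) ^ (Nat.size m - 1) - 1))
      else
        (if (2:Int) ^ Nat.size m - 1 = prev then false
         else loopA ((m : Int) - ((2:Int) ^ Nat.size m - 1)) ((2:Int) ^ Nat.size m - 1))) := by
  rw [loopA]
  rw [dif_pos (by exact_mod_cast hm : (0:Int) < (m:Int))]
  simp only [Int.toNat_natCast]
  by_cases hc : (2:Int) ^ Nat.size m - 1 > (m : Int)
  · rw [dif_pos hc, if_pos hc]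
  · rw [dif_neg hc, if_neg hc]

-- characterization of A's loop: with prev = 2^j - 1 and m < 2^j,
-- the loop accepts iff m is the MMR size of some leaf count M < 2^(j-1)
theorem loopA_char (m : Nat) : ∀ (j : Nat), 1 ≤ j → m < 2 ^ j →
    (loopA (m : Int) ((2:Int) ^ j - 1) = true ↔ ∃ M : Nat, M < 2 ^ (j - 1) ∧ m = f M) := by
  induction m using Nat.strong_induction_on with
  | _ m ih =>
    intro j hj hmj
    rcases Nat.eq_zero_or_pos m with h0 | h0
    · subst h0
      rw [loopA, dif_neg (by norm_num)]
      simp only [Int.natCast_zero, decide_eq_true_eq]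
      constructor
      · intro _
        exact ⟨0, pow_pos (by norm_num) _, by simp [f, pc_zero]⟩
      · intro _
        trivial
    · -- m ≥ 1
      have hs1 : 0 < Nat.size m := Nat.size_pos.mpr h0
      have hlo : 2 ^ (Nat.size m - 1) ≤ m := Nat.lt_size.mp (by omega)
      have hhi : m < 2 ^ Nat.size m := Nat.lt_size_self m
      have hsj : Nat.size m ≤ j := Nat.size_le.mpr hmj
      have hcS : (2:Int) ^ Nat.size m = ((2 ^ Nat.size m : Nat) : Int) := by push_cast; ring
      have hcS1 : (2:Int) ^ (Nat.size m - 1) = ((2 ^ (Nat.size m - 1) : Nat) : Int) := by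
        push_cast; ring
      have hcJ : (2:Int) ^ j = ((2 ^ j : Nat) : Int) := by push_cast; ring
      have hpS : (2:Nat) ^ Nat.size m = 2 * 2 ^ (Nat.size m - 1) := by
        rw [← pow_succ']
        congr 1
        omega
      rw [loopA_unfold m _ h0]
      by_cases hgt : (2:Int) ^ Nat.size m - 1 > (m : Int)
      · -- adjusted branch: peak = 2^(size m - 1) - 1, and size m ≥ 2
        have hs2 : 2 ≤ Nat.size m := by
          by_contra hcon
          have : Nat.size m = 1 := by omega
          rw [this] at hgt
          norm_num at hgt
          omega
        have hltj : Nat.size m - 1 < j := by omega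
        have hplt : (2:Nat) ^ (Nat.size m - 1) < 2 ^ j :=
          Nat.pow_lt_pow_right (by norm_num) hltj
        rw [if_pos hgt, if_neg (by omega)]
        -- recurse on r = m - (2^(size m - 1) - 1)
        have harg : (m : Int) - ((2:Int) ^ (Nat.size m - 1) - 1) =
            ((m - (2 ^ (Nat.size m - 1) - 1) : Nat) : Int) := by omega
        rw [harg]
        have hr1 : m - (2 ^ (Nat.size m - 1) - 1) < m := by
          have hge2 : (2:Nat) ^ 1 ≤ 2 ^ (Nat.size m - 1) :=
            Nat.pow_le_pow_right (by norm_num) (by omega)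
          omega
        have hr2 : m - (2 ^ (Nat.size m - 1) - 1) < 2 ^ (Nat.size m - 1) := by omega
        have hcprev : ((2:Int) ^ (Nat.size m - 1) - 1) = (2:Int) ^ (Nat.size m - 1) - 1 := rfl
        rw [ih _ hr1 (Nat.size m - 1) (by omega) hr2]
        have hpS2 : (2:Nat) ^ (Nat.size m - 1) = 2 * 2 ^ (Nat.size m - 1 - 1) := by
          rw [← pow_succ']
          congr 1
          omega
        constructor
        · rintro ⟨M, hM, hfM⟩
          refine ⟨2 ^ (Nat.size m - 1 - 1) + M, ?_, ?_⟩
          · have h1 : (2:Nat) ^ (Nat.size m - 1 - 1) + M < 2 ^ (Nat.size m - 1) := by omega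
            have h2 : (2:Nat) ^ (Nat.size m - 1) ≤ 2 ^ (j - 1) :=
              Nat.pow_le_pow_right (by norm_num) (by omega)
            omega
          · rw [f_pow_add _ _ hM]
            have : Nat.size m - 1 - 1 + 1 = Nat.size m - 1 := by omega
            rw [this]
            omega
        · rintro ⟨L, hL, hfL⟩
          -- L is in [2^(size m - 2), 2^(size m - 1))
          have hge : 2 ^ (Nat.size m - 1 - 1) ≤ L := by
            by_contra hcon
            have hlt' : L < 2 ^ (Nat.size m - 1 - 1) := by omega
            have hfl : f L < f (2 ^ (Nat.size m - 1 - 1)) := f_strictMono hlt'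
            rw [f_pow] at hfl
            have : Nat.size m - 1 - 1 + 1 = Nat.size m - 1 := by omega
            rw [this] at hfl
            omega
          have hlt2 : L < 2 ^ (Nat.size m - 1) := by
            by_contra hcon
            have hge' : 2 ^ (Nat.size m - 1) ≤ L := by omega
            have hfl : f (2 ^ (Nat.size m - 1)) ≤ f L := f_strictMono.le_iff_le.mpr hge'
            rw [f_pow] at hfl
            have heq : Nat.size m - 1 + 1 = Nat.size m := by omega
            rw [heq] at hfl
            omega
          refine ⟨L - 2 ^ (Nat.size m - 1 - 1), by omega, ?_⟩
          have hsplit : L = 2 ^ (Nat.size m - 1 - 1) + (L - 2 ^ (Nat.size m - 1 - 1)) := by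
            omega
          have hMlt : L - 2 ^ (Nat.size m - 1 - 1) < 2 ^ (Nat.size m - 1 - 1) := by omega
          rw [hsplit, f_pow_add _ _ hMlt] at hfL
          have : Nat.size m - 1 - 1 + 1 = Nat.size m - 1 := by omega
          rw [this] at hfL
          omega
      · -- unadjusted branch: m = 2^(size m) - 1
        have hm_eq : m = 2 ^ Nat.size m - 1 := by omega
        by_cases hjs : Nat.size m = j
        · -- peak = prev: A returns False; and no leaf count fits
          rw [if_neg hgt, if_pos (by rw [hjs])]
          simp only [Bool.false_eq_true, false_iff, not_exists]
          rintro M ⟨hM, hfM⟩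
          rcases Nat.eq_zero_or_pos M with hM0 | hM0
          · subst hM0
            rw [show f 0 = 0 by simp [f, pc_zero]] at hfM
            omega
          · have h1 : f M ≤ 2 * M - 1 := f_ub M hM0
            have h2 : (2:Nat) ^ j = 2 * 2 ^ (j - 1) := by rw [← hjs]; exact hpS
            have h3 : m = 2 ^ j - 1 := by rw [← hjs]; exact hm_eq
            omega
        · -- peak < prev: subtract the whole of m, the loop then accepts with remainder 0
          have hlt' : Nat.size m < j := by omega
          have hplt : (2:Nat) ^ Nat.size m < 2 ^ j := Nat.pow_lt_pow_right (by norm_num) hlt'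
          rw [if_neg hgt, if_neg (by omega)]
          have harg : (m : Int) - ((2:Int) ^ Nat.size m - 1) = ((0 : Nat) : Int) := by omega
          rw [harg, loopA, dif_neg (by norm_num)]
          simp only [Int.natCast_zero, decide_eq_true_eq]
          constructor
          · intro _
            refine ⟨2 ^ (Nat.size m - 1), ?_, ?_⟩
            · have h1 : Nat.size m - 1 < j - 1 := by omega
              exact Nat.pow_lt_pow_right (by norm_num) h1
            · rw [f_pow]
              have : Nat.size m - 1 + 1 = Nat.size m := by omega
              rw [this]
              omega
          · intro _
            trivial

theorem A_char (m : Nat) : is_valid_mmr_size (m : Int) = true ↔ ∃ L : Nat, m = f L := by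
  unfold is_valid_mmr_size
  rcases Nat.eq_zero_or_pos m with h0 | h0
  · subst h0
    rw [loopA, dif_neg (by norm_num)]
    simp only [Int.natCast_zero, decide_eq_true_eq]
    constructor
    · intro _
      exact ⟨0, by simp [f, pc_zero]⟩
    · intro _
      trivial
  · have hs1 : 0 < Nat.size m := Nat.size_pos.mpr h0
    have hlo : 2 ^ (Nat.size m - 1) ≤ m := Nat.lt_size.mp (by omega)
    have hhi : m < 2 ^ Nat.size m := Nat.lt_size_self m
    have hcS : (2:Int) ^ Nat.size m = ((2 ^ Nat.size m : Nat) : Int) := by push_cast; ring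
    have hcS1 : (2:Int) ^ (Nat.size m - 1) = ((2 ^ (Nat.size m - 1) : Nat) : Int) := by
      push_cast; ring
    have hcS2 : (2:Int) ^ (Nat.size m + 1) = ((2 ^ (Nat.size m + 1) : Nat) : Int) := by
      push_cast; ring
    have hpS : (2:Nat) ^ (Nat.size m + 1) = 2 * 2 ^ Nat.size m := by
      ring
    -- running A's loop with prev = 0 or prev = 2^(size m + 1) - 1 takes the same first step
    have hsame : loopA (m : Int) 0 = loopA (m : Int) ((2:Int) ^ (Nat.size m + 1) - 1) := by
      rw [loopA_unfold m _ h0, loopA_unfold m _ h0]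
      by_cases hgt : (2:Int) ^ Nat.size m - 1 > (m : Int)
      · have hs2 : 2 ≤ Nat.size m := by
          by_contra hcon
          have : Nat.size m = 1 := by omega
          rw [this] at hgt
          norm_num at hgt
          omega
        have hplt : (2:Nat) ^ (Nat.size m - 1) < 2 ^ (Nat.size m + 1) :=
          Nat.pow_lt_pow_right (by norm_num) (by omega)
        have hpge : (2:Nat) ^ 1 ≤ 2 ^ (Nat.size m - 1) :=
          Nat.pow_le_pow_right (by norm_num) (by omega)
        rw [if_pos hgt, if_pos hgt, if_neg (by omega), if_neg (by omega)]
      · have hplt : (2:Nat) ^ Nat.size m < 2 ^ (Nat.size m + 1) :=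
          Nat.pow_lt_pow_right (by norm_num) (by omega)
        have hpge : (2:Nat) ^ 1 ≤ 2 ^ Nat.size m :=
          Nat.pow_le_pow_right (by norm_num) (by omega)
        rw [if_neg hgt, if_neg hgt, if_neg (by omega), if_neg (by omega)]
    rw [hsame, loopA_char m (Nat.size m + 1) (by omega) (by omega)]
    constructor
    · rintro ⟨M, _, hfM⟩
      exact ⟨M, hfM⟩
    · rintro ⟨L, hL⟩
      refine ⟨L, ?_, hL⟩
      have := f_le_self L
      simp only [Nat.add_sub_cancel]
      omega

theorem B_char (m : Nat) : is_valid_mmr_size_alt (m : Int) = true ↔ ∃ L : Nat, m = f L := by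
  unfold is_valid_mmr_size_alt
  rw [if_neg (by exact_mod_cast Nat.not_lt_zero m : ¬ ((m:Int) < 0))]
  rw [List.any_eq_true]
  simp only [Int.toNat_natCast]
  constructor
  · rintro ⟨p, hp, hpred⟩
    rw [PySem.List.mem_pyRange_one] at hp
    obtain ⟨hp0, hplt⟩ := hp
    obtain ⟨q, rfl⟩ : ∃ q : Nat, p = (q : Int) := ⟨p.toNat, by omega⟩
    by_cases hmod : PySem.Int.mod ((m : Int) + (q : Int)) 2 == 0
    · rw [if_pos hmod] at hpred
      have hmod' : PySem.Int.mod ((m : Int) + (q : Int)) 2 = 0 := by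
        exact beq_iff_eq.mp hmod
      have hdvd : (2:Int) ∣ ((m : Int) + (q : Int)) :=
        (PySem.Int.mod_eq_zero_iff_dvd _ _).mp hmod'
      have hdvdN : 2 ∣ (m + q) := by
        have : ((m + q : Nat) : Int) = (m : Int) + (q : Int) := by push_cast; ring
        exact_mod_cast this ▸ hdvd
      have hfd : PySem.Int.floordiv ((m : Int) + (q : Int)) 2 = (((m + q) / 2 : Nat) : Int) := by
        rw [PySem.Int.floordiv_eq_ediv_of_pos (by norm_num)]
        rw [show (m : Int) + (q : Int) = ((m + q : Nat) : Int) by push_cast; ring]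
        exact_mod_cast (Int.natCast_div (m + q) 2).symm
      rw [hfd] at hpred
      simp only [Int.toNat_natCast] at hpred
      have hpc : pc ((m + q) / 2) = q := by exact_mod_cast beq_iff_eq.mp hpred
      refine ⟨(m + q) / 2, ?_⟩
      unfold f
      rw [hpc]
      omega
    · rw [if_neg hmod] at hpred
      exact absurd hpred (by simp)
  · rintro ⟨L, hL⟩
    have hple := pc_le_self L
    have hLm : L ≤ m := le_of_le_of_eq (f_le_self L) hL.symm
    have h2L : m + pc L = 2 * L := by
      unfold f at hL
      omega
    refine ⟨(pc L : Int), ?_, ?_⟩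
    · rw [PySem.List.mem_pyRange_one]
      have hsz : pc L ≤ Nat.size m := le_trans (pc_le_size L) (Nat.size_le_size hLm)
      constructor
      · positivity
      · have : ((pc L : Nat) : Int) < (Nat.size m : Int) + 3 := by exact_mod_cast by omega
        exact this
    · have hsum : (m : Int) + (pc L : Int) = ((2 * L : Nat) : Int) := by exact_mod_cast h2L
      rw [hsum]
      have hmod' : PySem.Int.mod ((2 * L : Nat) : Int) 2 = 0 := by
        rw [(PySem.Int.mod_eq_zero_iff_dvd _ _)]
        exact ⟨(L : Int), by push_cast; ring⟩
      rw [if_pos (beq_iff_eq.mpr hmod')]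
      have hfd : PySem.Int.floordiv ((2 * L : Nat) : Int) 2 = (L : Int) := by
        rw [PySem.Int.floordiv_eq_ediv_of_pos (by norm_num)]
        have : ((2 * L : Nat) : Int) = 2 * (L : Int) := by push_cast; ring
        rw [this]
        omega
      rw [hfd]
      simp

-- ===== VERDICT (by name: the statement is the Claim_ definition above) =====
theorem is_valid_mmr_size_spec : Claim_equal_is_valid_mmr_size := by
  intro n _
  unfold Spec_is_valid_mmr_size
  rcases lt_or_ge n 0 with hn | hn
  · unfold is_valid_mmr_size is_valid_mmr_size_alt
    rw [loopA, dif_neg (by omega), if_pos hn]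
    simp
    omega
  · have hcast : ((n.toNat : Int)) = n := Int.toNat_of_nonneg hn
    rw [← hcast, Bool.eq_iff_iff, A_char n.toNat, B_char n.toNat]
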